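-- pv_equiv track=rewrite | github.com/seelengxd/aoc-2023 | day10/day10.py | convert_junk
-- ===== SOURCE A (Python) =====
-- def convert_junk(data, visited):
--     result = []
--     for i in range(len(data)):
--         new_row = []
--         for j in range(len(data[0])):
--             if (i, j) not in visited:
--                 new_row.append(".")
--             else:
--                 new_row.append(data[i][j])
--         result.append(new_row)
--     return result
-- ===== SOURCE B (Python) =====
-- def convert_junk(data, visited):
--     result = [["."] * len(data[0]) for _ in range(len(data))]
--     for i, j in visited:
--         if 0 <= i < len(result) and 0 <= j < len(result[i]):
--             result[i][j] = data[i][j]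
--     return result
-- ===== Notes on version B (the rewrite author's own statement) =====
-- stated objective: faster
-- what changed: Instead of scanning every grid cell and membership-testing it against visited (O(rows*cols*|visited|)), B builds a dot-filled grid once and overwrites only the visited coordinates, iterating the sparse visited list.
import Mathlib
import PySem

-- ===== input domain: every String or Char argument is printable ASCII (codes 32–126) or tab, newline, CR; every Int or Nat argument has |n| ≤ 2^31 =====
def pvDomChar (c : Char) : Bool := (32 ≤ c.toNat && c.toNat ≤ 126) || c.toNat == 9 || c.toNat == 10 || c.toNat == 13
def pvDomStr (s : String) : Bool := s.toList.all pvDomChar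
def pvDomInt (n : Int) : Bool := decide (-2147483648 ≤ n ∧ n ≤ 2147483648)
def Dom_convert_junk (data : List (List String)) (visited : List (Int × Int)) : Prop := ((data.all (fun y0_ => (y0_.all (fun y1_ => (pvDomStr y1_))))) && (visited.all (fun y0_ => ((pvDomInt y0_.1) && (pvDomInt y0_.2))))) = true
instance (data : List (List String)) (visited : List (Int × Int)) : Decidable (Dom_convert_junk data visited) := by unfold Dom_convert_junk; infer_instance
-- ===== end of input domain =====

-- B builds a dot-filled grid once and overwrites only the visited coordinates,
-- iterating the sparse visited list instead of membership-testing every cell: faster.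


-- ===== PORT A =====
-- literal port of A: for i in range(len(data)): row built by appending, for j in range(len(data[0])):
-- '.' when (i,j) not in visited, else data[i][j] (in range under Pre_; getD "." is never hit there)
def convert_junk (data : List (List String)) (visited : List (Int × Int)) : List (List String) :=
  (List.range data.length).foldl (fun result (i : Nat) =>
    result ++ [ (List.range (data.headD []).length).foldl (fun new_row (j : Nat) =>
      new_row ++ [ if (((i : Int)), ((j : Int))) ∉ visited then "."
                   else (data.getD i []).getD j "." ]) [] ]) []

-- ===== PORT B =====
-- port of B's loop body: result[i][j] = data[i][j] guarded by 0<=i<len(result), 0<=j<len(result[i])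
def bStep (data : List (List String)) (res : List (List String)) (p : Int × Int) : List (List String) :=
  if 0 ≤ p.1 ∧ p.1 < (res.length : Int) ∧ 0 ≤ p.2 ∧ p.2 < ((res.getD p.1.toNat []).length : Int) then
    res.set p.1.toNat ((res.getD p.1.toNat []).set p.2.toNat ((data.getD p.1.toNat []).getD p.2.toNat "."))
  else res

def convert_junk_alt (data : List (List String)) (visited : List (Int × Int)) : List (List String) :=
  let result := (List.range data.length).map (fun _ => List.replicate (data.headD []).length ".")
  visited.foldl (bStep data) result

-- ===== PRECONDITION & SPEC =====
-- Pre_ excludes exactly the inputs where both Pythons raise IndexError: a visited coordinate that is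
-- inside the len(data) x len(data[0]) rectangle but beyond the end of its (shorter, ragged) row.
def Pre_convert_junk (data : List (List String)) (visited : List (Int × Int)) : Prop :=
  ∀ p ∈ visited, 0 ≤ p.1 → p.1 < (data.length : Int) → 0 ≤ p.2 → p.2 < ((data.headD []).length : Int) →
    p.2 < (((data.getD p.1.toNat []).length : Int))
instance (data : List (List String)) (visited : List (Int × Int)) : Decidable (Pre_convert_junk data visited) := by unfold Pre_convert_junk; infer_instance

def pvWitness_convert_junk : List (List String) × (List (Int × Int)) :=
  ([["|", "-"], ["L", "7"]], [((0 : Int), (1 : Int)), ((1 : Int), (0 : Int)), ((5 : Int), (-2 : Int))])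

def Spec_convert_junk (data : List (List String)) (visited : List (Int × Int)) (out : List (List String)) : Prop := out = convert_junk_alt data visited
instance (data : List (List String)) (visited : List (Int × Int)) (out : List (List String)) : Decidable (Spec_convert_junk data visited out) := by unfold Spec_convert_junk; infer_instance

-- ===== CLAIM (what is proved, stated in full; the proofs are below) =====
def Claim_equal_convert_junk : Prop := ∀ (data : List (List String)) (visited : List (Int × Int)), Dom_convert_junk data visited → Pre_convert_junk data visited → Spec_convert_junk data visited (convert_junk data visited)

-- ===== LEMMAS AND PROOFS =====

theorem foldl_append_map {α β : Type} (f : α → β) (l : List α) (a : List β) :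
    l.foldl (fun acc x => acc ++ [f x]) a = a ++ l.map f := by
  induction l generalizing a with
  | nil => simp
  | cons x xs ih => simp [List.foldl, ih]

theorem convert_junk_eq_map (data : List (List String)) (visited : List (Int × Int)) :
    convert_junk data visited =
      (List.range data.length).map (fun (i : Nat) => (List.range (data.headD []).length).map (fun (j : Nat) =>
        if (((i : Int)), ((j : Int))) ∈ visited then (data.getD i []).getD j "." else ".")) := by
  unfold convert_junk
  rw [foldl_append_map (fun (i : Nat) => (List.range (data.headD []).length).foldl (fun new_row (j : Nat) =>
      new_row ++ [ if (((i : Int)), ((j : Int))) ∉ visited then "."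
                   else (data.getD i []).getD j "." ]) [])]
  simp only [List.nil_append]
  apply List.map_congr_left; intro i _
  rw [foldl_append_map]
  simp only [List.nil_append]
  apply List.map_congr_left; intro j _
  by_cases h : ((i : Int), (j : Int)) ∈ visited <;> simp [h]

theorem getD_mem_of_lt {α : Type} (l : List α) (d : α) (i : Nat) (h : i < l.length) :
    l.getD i d ∈ l := by
  rw [List.getD_eq_getElem l d h]; exact List.getElem_mem h

theorem bStep_length (data : List (List String)) (res : List (List String)) (p : Int × Int) :
    (bStep data res p).length = res.length := by
  unfold bStep; split <;> simp

theorem bStep_rows (data : List (List String)) (res : List (List String)) (p : Int × Int)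
    (m : Nat) (h : ∀ r ∈ res, r.length = m) : ∀ r ∈ bStep data res p, r.length = m := by
  unfold bStep; split
  · rename_i hg
    have hp1 : p.1.toNat < res.length := by omega
    intro r hr
    rcases List.mem_or_eq_of_mem_set hr with h1 | h1
    · exact h r h1
    · subst h1
      rw [List.length_set]
      exact h _ (getD_mem_of_lt _ _ _ hp1)
  · exact h

theorem foldl_bStep_length (data : List (List String)) (vs : List (Int × Int)) (res : List (List String)) :
    (vs.foldl (bStep data) res).length = res.length := by
  induction vs generalizing res with
  | nil => rfl
  | cons p rest ih => simp [List.foldl, ih, bStep_length]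

theorem bStep_cell (data : List (List String)) (res : List (List String)) (p : Int × Int)
    (m : Nat) (hrows : ∀ r ∈ res, r.length = m) (i j : Nat) (hi : i < res.length) (hj : j < m) :
    ((bStep data res p).getD i []).getD j "" =
      if p = ((i : Int), (j : Int)) then (data.getD i []).getD j "."
      else (res.getD i []).getD j "" := by
  unfold bStep
  have hrow : (res.getD i []).length = m := hrows _ (getD_mem_of_lt _ _ _ hi)
  by_cases hp : p = ((i : Int), (j : Int))
  · subst hp
    simp only [Int.toNat_natCast]
    have hg : (0:Int) ≤ (i:Int) ∧ (i:Int) < (res.length:Int) ∧ (0:Int) ≤ (j:Int) ∧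
        (j:Int) < ((res.getD i []).length : Int) := by
      refine ⟨by positivity, by exact_mod_cast hi, by positivity, ?_⟩
      rw [hrow]; exact_mod_cast hj
    rw [if_pos hg, if_pos trivial]
    simp only [List.getD_eq_getElem?_getD, List.getElem?_set_self hi, Option.getD_some,
      List.getElem?_set_self (by rw [← List.getD_eq_getElem?_getD, hrow]; exact hj :
        j < (res[i]?.getD []).length)]
  · rw [if_neg hp]
    split
    · rename_i hg
      obtain ⟨h1, h2, h3, h4⟩ := hg
      have hp1 : p.1.toNat < res.length := by omega
      by_cases hpi : p.1.toNat = i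
      · have hpj : p.2.toNat ≠ j := by
          intro hpj; apply hp
          exact Prod.ext (by omega) (by omega)
        subst hpi
        simp only [List.getD_eq_getElem?_getD, List.getElem?_set_self hp1, Option.getD_some,
          List.getElem?_set_ne hpj]
      · simp only [List.getD_eq_getElem?_getD, List.getElem?_set_ne hpi]
    · rfl

theorem foldl_bStep_rows (data : List (List String)) (vs : List (Int × Int)) (res : List (List String))
    (m : Nat) (hrows : ∀ r ∈ res, r.length = m) : ∀ r ∈ vs.foldl (bStep data) res, r.length = m := by
  induction vs generalizing res with
  | nil => exact hrows
  | cons p rest ih => exact ih (bStep data res p) (bStep_rows data res p m hrows)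

theorem foldl_bStep_cell (data : List (List String)) (vs : List (Int × Int)) (res : List (List String))
    (m : Nat) (hrows : ∀ r ∈ res, r.length = m) (i j : Nat) (hi : i < res.length) (hj : j < m) :
    ((vs.foldl (bStep data) res).getD i []).getD j "" =
      if ((i : Int), (j : Int)) ∈ vs then (data.getD i []).getD j "."
      else (res.getD i []).getD j "" := by
  induction vs generalizing res with
  | nil => rfl
  | cons p rest ih =>
    simp only [List.foldl]
    rw [ih (bStep data res p) (bStep_rows data res p m hrows) ((bStep_length data res p) ▸ hi),
      bStep_cell data res p m hrows i j hi hj]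
    by_cases hp : p = ((i : Int), (j : Int)) <;>
      by_cases hm : ((i : Int), (j : Int)) ∈ rest <;>
      simp [hp, hm, List.mem_cons, eq_comm]

-- ===== VERDICT (by name: the statement is the Claim_ definition above) =====
theorem convert_junk_spec : Claim_equal_convert_junk := by
  intro data visited _ _
  unfold Spec_convert_junk convert_junk_alt
  rw [convert_junk_eq_map]
  set m := (data.headD []).length with hm
  set init := (List.range data.length).map (fun _ => List.replicate m ".") with hinit
  have hinitlen : init.length = data.length := by simp [hinit]
  have hinitrows : ∀ r ∈ init, r.length = m := by
    intro r hr
    simp only [hinit, List.mem_map] at hr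
    obtain ⟨_, _, rfl⟩ := hr
    simp
  have hlen : (visited.foldl (bStep data) init).length = data.length := by
    rw [foldl_bStep_length, hinitlen]
  have hrows := foldl_bStep_rows data visited init m hinitrows
  apply List.ext_getElem (by simp [hlen])
  intro i h1 h2
  have hi : i < data.length := by simpa using h1
  apply List.ext_getElem
  · simp only [List.getElem_map, List.getElem_range, List.length_map, List.length_range]
    rw [hrows _ (List.getElem_mem h2)]
  intro j hj1 hj2
  have hj : j < m := by simp only [List.getElem_map, List.getElem_range, List.length_map,
    List.length_range] at hj1; exact hj1
  have hcell := foldl_bStep_cell data visited init m hinitrows i j (by omega) hj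
  have hinitcell : (init.getD i []).getD j "" = "." := by
    simp [hinit, List.getD_eq_getElem?_getD, hi, hj]
  rw [hinitcell] at hcell
  have hL : ((List.range data.length).map (fun i => (List.range m).map (fun j =>
      if (((i : Nat) : Int), ((j : Nat) : Int)) ∈ visited then (data.getD i []).getD j "." else ".")))[i][j] =
      (if ((i : Int), (j : Int)) ∈ visited then (data.getD i []).getD j "." else ".") := by
    simp [List.getElem_map, List.getElem_range]
  rw [hL, ← hcell, List.getD_eq_getElem _ _ (by omega : i < (visited.foldl (bStep data) init).length),
    List.getD_eq_getElem]
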